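-- pv_equiv track=rewrite | github.com/MrBrantCode/unitest_baseline | mut_generate/mist_train_cf/cf_92541/solution.py | column_sums
-- ===== SOURCE A (Python) =====
-- def column_sums(array):
--     column_sums = []
--     for row in array:
--         for i, num in enumerate(row):
--             if len(column_sums) <= i:
--                 column_sums.append(num)
--             else:
--                 column_sums[i] += num
--     return column_sums
-- ===== SOURCE B (Python) =====
-- def column_sums(array):
--     # Column-major: for each column index, gather that column's values and fold them.
--     width = max((len(row) for row in array), default=0)
--     result = []
--     for i in range(width):
--         vals = [row[i] for row in array if i < len(row)]
--         acc = vals[0]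
--         for v in vals[1:]:
--             acc = acc + v
--         result.append(acc)
--     return result
-- ===== Notes on version B (the rewrite author's own statement) =====
-- stated objective: alternative
-- what changed: B traverses column-by-column (compute the max width, then fold each column's values seeded by its first element) instead of A's single row-major pass that grows/updates an accumulator list in place.
import Mathlib
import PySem

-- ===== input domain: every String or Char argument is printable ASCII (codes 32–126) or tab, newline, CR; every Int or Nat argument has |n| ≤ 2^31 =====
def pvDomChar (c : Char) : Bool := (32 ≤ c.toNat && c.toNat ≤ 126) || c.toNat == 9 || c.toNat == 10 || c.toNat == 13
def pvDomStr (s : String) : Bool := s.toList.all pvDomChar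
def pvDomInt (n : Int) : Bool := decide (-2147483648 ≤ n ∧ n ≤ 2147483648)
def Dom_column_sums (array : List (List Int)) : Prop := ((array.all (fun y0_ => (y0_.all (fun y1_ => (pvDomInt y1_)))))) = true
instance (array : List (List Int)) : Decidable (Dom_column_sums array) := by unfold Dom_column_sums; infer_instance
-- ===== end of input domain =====

-- B sums each column by a column-major traversal (max width, then fold each column
-- seeded by its first value) instead of A's row-major accumulating pass; alternative
-- decomposition, same return value (A's in-place += is unobservable on Int elements).


-- ===== PORT A =====
-- hand transcription of `for i, num in enumerate(row): if len(cs) <= i: cs.append(num) else: cs[i] += num`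
-- (i is the running enumerate index; `cs[i] += num` = read cs[i] (in range here) and set it)
def columnSumsRow (cs : List Int) (i : Nat) (row : List Int) : List Int :=
  match row with
  | [] => cs
  | num :: rest =>
      let cs' := if cs.length ≤ i then cs ++ [num] else cs.set i (cs.getD i 0 + num)
      columnSumsRow cs' (i + 1) rest

def column_sums (array : List (List Int)) : List Int :=
  array.foldl (fun cs row => columnSumsRow cs 0 row) []

-- ===== PORT B =====
-- width = max((len(row) for row in array), default=0)
def altWidth (array : List (List Int)) : Nat :=
  array.foldl (fun w row => max w row.length) 0

-- vals = [row[i] for row in array if i < len(row)]  (collect the in-range lookups)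
def altCol (array : List (List Int)) (i : Nat) : List Int :=
  array.filterMap (fun row => row[i]?)

-- acc = vals[0]; for v in vals[1:]: acc = acc + v   (vals is nonempty for i < width;
-- the [] branch is unreachable there and returns 0 only to make the match total)
def altReduce (vals : List Int) : Int :=
  match vals with
  | [] => 0
  | h :: t => t.foldl (· + ·) h

def column_sums_alt (array : List (List Int)) : List Int :=
  (List.range (altWidth array)).map (fun i => altReduce (altCol array i))

-- ===== PRECONDITION & SPEC =====
def Spec_column_sums (array : List (List Int)) (out : List Int) : Prop := out = column_sums_alt array
instance (array : List (List Int)) (out : List Int) : Decidable (Spec_column_sums array out) := by unfold Spec_column_sums; infer_instance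

-- ===== CLAIM (what is proved, stated in full; the proofs are below) =====
def Claim_equal_column_sums : Prop := ∀ (array : List (List Int)), Dom_column_sums array → Spec_column_sums array (column_sums array)

-- ===== LEMMAS AND PROOFS =====

/-- Pointwise addition padding with the longer list. -/
def addPad : List Int → List Int → List Int
  | a, [] => a
  | [], r => r
  | x :: a, y :: r => (x + y) :: addPad a r

lemma addPad_nil_left (r : List Int) : addPad [] r = r := by
  cases r <;> rfl

lemma addPad_nil_right (a : List Int) : addPad a [] = a := by
  cases a <;> rfl

lemma columnSumsRow_split (row : List Int) : ∀ (pre post : List Int),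
    columnSumsRow (pre ++ post) pre.length row = pre ++ addPad post row := by
  induction row with
  | nil => intro pre post; simp [columnSumsRow, addPad_nil_right]
  | cons num rest ih =>
    intro pre post
    rw [columnSumsRow]
    cases post with
    | nil =>
      have h := ih (pre ++ [num]) []
      simp [addPad_nil_left] at h ⊢
      simpa using h
    | cons p ps =>
      have hcond : ¬ (pre ++ p :: ps).length ≤ pre.length := by simp
      simp only [hcond, if_false]
      have hget : (pre ++ p :: ps).getD pre.length 0 = p := by
        simp [List.getD]
      have hset : (pre ++ p :: ps).set pre.length (p + num) = (pre ++ [p + num]) ++ ps := by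
        rw [List.set_append]
        simp
      rw [hget, hset]
      have h := ih (pre ++ [p + num]) ps
      simp only [List.length_append, List.length_cons, List.length_nil] at h ⊢
      rw [h]
      simp [addPad]

lemma columnSumsRow_zero (cs row : List Int) : columnSumsRow cs 0 row = addPad cs row := by
  simpa using columnSumsRow_split row [] cs

lemma addPad_length (a b : List Int) : (addPad a b).length = max a.length b.length := by
  induction a generalizing b with
  | nil => cases b <;> simp [addPad]
  | cons x a ih => cases b <;> simp [addPad, ih]

lemma addPad_getD (a b : List Int) (i : Nat) :
    (addPad a b).getD i 0 = a.getD i 0 + b.getD i 0 := by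
  induction a generalizing b i with
  | nil => cases b <;> simp [addPad]
  | cons x a ih =>
    cases b with
    | nil => simp [addPad]
    | cons y b =>
      cases i with
      | zero => simp [addPad]
      | succ n => simpa [addPad] using ih b n

lemma foldl_addPad_length (rows : List (List Int)) : ∀ (acc : List Int),
    (rows.foldl addPad acc).length = rows.foldl (fun w row => max w row.length) acc.length := by
  induction rows with
  | nil => intro acc; rfl
  | cons r rows ih => intro acc; simp [List.foldl_cons, ih, addPad_length]

lemma foldl_addPad_getD (rows : List (List Int)) : ∀ (acc : List Int) (i : Nat),
    (rows.foldl addPad acc).getD i 0 = acc.getD i 0 + (rows.map (fun r => r.getD i 0)).sum := by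
  induction rows with
  | nil => intro acc i; simp
  | cons r rows ih =>
    intro acc i
    rw [List.foldl_cons, ih, addPad_getD, List.map_cons, List.sum_cons]
    ring

lemma foldl_add_sum (t : List Int) : ∀ x : Int, t.foldl (· + ·) x = x + t.sum := by
  induction t with
  | nil => intro x; simp
  | cons y t ih =>
    intro x
    rw [List.foldl_cons, ih, List.sum_cons]
    ring

lemma altReduce_eq_sum (vals : List Int) : vals ≠ [] → altReduce vals = vals.sum := by
  intro h
  cases vals with
  | nil => exact absurd rfl h
  | cons x t =>
    show t.foldl (· + ·) x = (x :: t).sum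
    rw [foldl_add_sum, List.sum_cons]

lemma altCol_sum (array : List (List Int)) (i : Nat) :
    (altCol array i).sum = (array.map (fun r => r.getD i 0)).sum := by
  induction array with
  | nil => rfl
  | cons r rows ih =>
    unfold altCol at *
    cases hr : r[i]? with
    | none => simp [hr, ih]
    | some v => simp [hr, ih]

lemma altWidth_cons (r : List Int) (rows : List (List Int)) :
    altWidth (r :: rows) = max (altWidth rows) r.length := by
  unfold altWidth
  simp only [List.foldl_cons]
  have gen : ∀ (l : List (List Int)) (a b : Nat),
      l.foldl (fun w row => max w row.length) (max a b)
        = max (l.foldl (fun w row => max w row.length) a) b := by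
    intro l
    induction l with
    | nil => intro a b; rfl
    | cons x xs ihx =>
      intro a b
      simp only [List.foldl_cons]
      rw [show max (max a b) x.length = max (max a x.length) b by omega, ihx]
  simpa using gen rows 0 r.length

lemma altCol_ne_nil (array : List (List Int)) (i : Nat) (h : i < altWidth array) :
    altCol array i ≠ [] := by
  induction array with
  | nil => simp [altWidth] at h
  | cons r rows ih =>
    unfold altCol
    rw [altWidth_cons] at h
    rcases Nat.lt_or_ge i r.length with hlt | hge
    · have hr : r[i]? = some r[i] := List.getElem?_eq_getElem hlt
      simp [hr]
    · have h2 : i < altWidth rows := by omega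
      intro hcontra
      apply ih h2
      cases hr : r[i]? with
      | none => rw [List.filterMap_cons, hr] at hcontra; exact hcontra
      | some v =>
        obtain ⟨hlen2, -⟩ := List.getElem?_eq_some_iff.mp hr
        omega

-- ===== VERDICT (by name: the statement is the Claim_ definition above) =====
theorem column_sums_spec : Claim_equal_column_sums := by
  intro array _
  show column_sums array = column_sums_alt array
  have hA : column_sums array = array.foldl addPad [] := by
    unfold column_sums
    congr 1
    funext cs row
    exact columnSumsRow_zero cs row
  rw [hA]
  unfold column_sums_alt
  apply List.ext_getElem
  · rw [foldl_addPad_length array []]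
    simp [altWidth]
  · intro i h1 h2
    have hlen : (array.foldl addPad []).length = altWidth array := by
      rw [foldl_addPad_length array []]; rfl
    have hiw : i < altWidth array := by omega
    have hrange : ((List.range (altWidth array)).map
        (fun i => altReduce (altCol array i)))[i] = altReduce (altCol array i) := by
      simp
    rw [hrange, altReduce_eq_sum _ (altCol_ne_nil array i hiw), altCol_sum]
    have := foldl_addPad_getD array [] i
    have hgd : (array.foldl addPad []).getD i 0 = (array.foldl addPad [])[i] :=
      List.getD_eq_getElem _ 0 h1
    rw [hgd] at this
    simpa using this
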